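-- pv_equiv track=rewrite | github.com/SIDED00R/Code_training | 프로그래머스/2/72411. 메뉴 리뉴얼/메뉴 리뉴얼.py | make_combination
-- ===== SOURCE A (Python) =====
-- def make_combination(letter, n):
--     comb = []
--     if n == 0:
--         return [[]]
--
--     for i in range(len(letter)):
--         now = letter[i]
--         rest = letter[i + 1:]
--         for j in make_combination(rest, n - 1):
--             comb.append(now + "".join(j))
--     return comb
-- ===== SOURCE B (Python) =====
-- def make_combination(letter, n):
--     if n == 0:
--         return [[]]
--     if n < 0:
--         return []
--     # bottom-up frontier: (partial string, remaining suffix) pairs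
--     frontier = [(letter[i], letter[i + 1:]) for i in range(len(letter))]
--     steps = n - 1
--     while steps > 0 and frontier:
--         frontier = [(s + rest[k], rest[k + 1:])
--                     for s, rest in frontier
--                     for k in range(len(rest))]
--         steps -= 1
--     return [s for s, _ in frontier]
-- ===== Notes on version B (the rewrite author's own statement) =====
-- stated objective: alternative
-- what changed: Replaces A's depth-first recursion over suffixes with an iterative breadth-first frontier: start from all single picks and extend every (partial, remaining-suffix) pair up to n-1 times, stopping early once the frontier is empty.
-- outside the precondition, e.g. on make_combination('ab', 0): A returns [[]], B returns [[]]
import Mathlib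
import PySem

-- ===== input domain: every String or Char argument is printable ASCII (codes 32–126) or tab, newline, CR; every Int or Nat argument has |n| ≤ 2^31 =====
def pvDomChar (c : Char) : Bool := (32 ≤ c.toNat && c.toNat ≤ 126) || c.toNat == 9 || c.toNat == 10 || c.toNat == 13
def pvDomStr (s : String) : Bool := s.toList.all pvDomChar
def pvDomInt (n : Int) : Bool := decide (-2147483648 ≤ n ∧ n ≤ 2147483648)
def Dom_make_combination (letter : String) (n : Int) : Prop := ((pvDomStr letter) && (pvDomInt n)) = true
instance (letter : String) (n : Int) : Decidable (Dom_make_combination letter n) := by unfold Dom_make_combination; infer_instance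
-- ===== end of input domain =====

-- B replaces A's depth-first recursion with an iterative breadth-first frontier loop (alternative decomposition, same cost).


-- ===== PORT A =====
-- A over the character list: the index loop 'for i in range(len(letter))' with
-- now = letter[i], rest = letter[i+1:] is the structural recursion over suffixes:
-- iteration i = 0 contributes (mkA rest (n-1)).map (c :: ·), iterations i ≥ 1 are
-- exactly A's loop run on rest with the same n. Strings are carried as List Char
-- (exact on this domain) and converted with String.mk at the wrapper.
def mkA (letter : List Char) (n : Int) : List (List Char) :=
  if n = 0 then [[]]
  else
    match letter with
    | [] => []
    | c :: rest => (mkA rest (n - 1)).map (fun j => c :: j) ++ mkA rest n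

def make_combination (letter : String) (n : Int) : List String :=
  (mkA letter.toList n).map (fun l => String.mk l)

-- ===== PORT B =====
-- picks rest = [(rest[k], rest[k+1:]) for k in range(len(rest))]
def picks (rest : List Char) : List (Char × List Char) :=
  match rest with
  | [] => []
  | c :: t => (c, t) :: picks t

-- one frontier extension step: extend each (s, rest) by every pick from rest
def stepB (fr : List (List Char × List Char)) : List (List Char × List Char) :=
  fr.flatMap (fun p => (picks p.2).map (fun q => (p.1 ++ [q.1], q.2)))

-- the 'while steps > 0 and frontier' loop: fuel = steps, early exit on empty frontier
def loopB (steps : Nat) (fr : List (List Char × List Char)) : List (List Char × List Char) :=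
  match steps with
  | 0 => fr
  | s + 1 => if fr = [] then fr else loopB s (stepB fr)

def make_combination_alt (letter : String) (n : Int) : List String :=
  if n = 0 then [""]
  else if n < 0 then []
  else
    let init := (picks letter.toList).map (fun q => ([q.1], q.2))
    ((loopB (n - 1).toNat init).map (fun p => String.mk p.1))

-- ===== PRECONDITION & SPEC =====
-- Pre_ excludes exactly n = 0: there Python A returns [[]], a list containing a
-- list, which is not a value of the declared return type list[str].
def Pre_make_combination (letter : String) (n : Int) : Prop := n ≠ 0
instance (letter : String) (n : Int) : Decidable (Pre_make_combination letter n) := by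
  unfold Pre_make_combination; infer_instance

def pvWitness_make_combination : String × Int := ("abc", 2)

def Spec_make_combination (letter : String) (n : Int) (out : List String) : Prop := out = make_combination_alt letter n
instance (letter : String) (n : Int) (out : List String) : Decidable (Spec_make_combination letter n out) := by unfold Spec_make_combination; infer_instance

-- ===== CLAIM (what is proved, stated in full; the proofs are below) =====
def Claim_equal_make_combination : Prop := ∀ (letter : String) (n : Int), Dom_make_combination letter n → Pre_make_combination letter n → Spec_make_combination letter n (make_combination letter n)

-- ===== LEMMAS AND PROOFS =====

-- model of the frontier: all length-m partial combinations with their remaining suffix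
def P (m : Nat) (cs : List Char) : List (List Char × List Char) :=
  match m, cs with
  | 0, cs => [([], cs)]
  | _ + 1, [] => []
  | m + 1, c :: rest => (P m rest).map (fun p => (c :: p.1, p.2)) ++ P (m + 1) rest

theorem mkA_neg (cs : List Char) : ∀ n : Int, n < 0 → mkA cs n = [] := by
  induction cs with
  | nil => intro n hn; unfold mkA; simp [show ¬ n = 0 by omega]
  | cons c rest ih =>
      intro n hn
      unfold mkA
      simp [show ¬ n = 0 by omega, ih (n - 1) (by omega), ih n hn]

theorem init_eq_P (cs : List Char) :
    (picks cs).map (fun q => ([q.1], q.2)) = P 1 cs := by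
  induction cs with
  | nil => simp [picks, P]
  | cons c rest ih => simp [picks, P, ih]

theorem stepB_map_cons (c : Char) (l : List (List Char × List Char)) :
    stepB (l.map (fun p => (c :: p.1, p.2))) = (stepB l).map (fun p => (c :: p.1, p.2)) := by
  simp [stepB, List.flatMap_map, List.map_flatMap, List.map_map, Function.comp_def]

theorem stepB_P (m : Nat) (cs : List Char) : stepB (P m cs) = P (m + 1) cs := by
  induction cs generalizing m with
  | nil =>
      cases m with
      | zero => simp [P, stepB, picks]
      | succ m => simp [P, stepB]
  | cons c rest ih =>
      cases m with
      | zero => simp [P, stepB, picks, init_eq_P]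
      | succ m =>
          show stepB ((P m rest).map (fun p => (c :: p.1, p.2)) ++ P (m + 1) rest) = _
          rw [show stepB ((P m rest).map (fun p => (c :: p.1, p.2)) ++ P (m + 1) rest)
              = stepB ((P m rest).map (fun p => (c :: p.1, p.2))) ++ stepB (P (m + 1) rest) by
              simp [stepB]]
          rw [stepB_map_cons, ih m, ih (m + 1)]
          rfl

theorem P_empty_succ (m : Nat) (cs : List Char) (h : P m cs = []) : P (m + 1) cs = [] := by
  rw [← stepB_P, h]; rfl

theorem loopB_P (k : Nat) : ∀ m : Nat, ∀ cs : List Char, loopB k (P m cs) = P (m + k) cs := by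
  induction k with
  | zero => intro m cs; simp [loopB]
  | succ k ih =>
      intro m cs
      unfold loopB
      by_cases h : P m cs = []
      · rw [if_pos h, h]
        have hall : ∀ j : Nat, P (m + j) cs = [] := by
          intro j
          induction j with
          | zero => simpa using h
          | succ j ihj => rw [← Nat.add_assoc]; exact P_empty_succ (m + j) cs ihj
        exact (hall (k + 1)).symm
      · rw [if_neg h, stepB_P, ih (m + 1) cs]
        congr 1
        omega

theorem mkA_zero (cs : List Char) : mkA cs 0 = [[]] := by
  conv_lhs => rw [mkA.eq_def]
  simp

theorem mkA_cons (c : Char) (rest : List Char) (n : Int) (h : n ≠ 0) :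
    mkA (c :: rest) n = (mkA rest (n - 1)).map (fun j => c :: j) ++ mkA rest n := by
  conv_lhs => rw [mkA.eq_def]
  simp [h]

theorem P_fst (cs : List Char) : ∀ m : Nat, (P (m + 1) cs).map Prod.fst = mkA cs ((m : Int) + 1) := by
  induction cs with
  | nil => intro m; unfold mkA; simp [P, show ¬ ((m : Int) + 1) = 0 by omega]
  | cons c rest ih =>
      intro m
      show ((P m rest).map (fun p => (c :: p.1, p.2)) ++ P (m + 1) rest).map Prod.fst = _
      rw [mkA_cons c rest ((m : Int) + 1) (by omega),
        show ((m : Int) + 1) - 1 = (m : Int) by omega]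
      simp only [List.map_append, List.map_map]
      cases m with
      | zero => simp only [Nat.cast_zero]; rw [mkA_zero]; simp [P, ih 0]
      | succ m' =>
          have h1 := ih m'
          have h2 := ih (m' + 1)
          push_cast at h1 h2 ⊢
          rw [← h1, ← h2, List.map_map]
          simp [Function.comp_def]

-- ===== VERDICT (by name: the statement is the Claim_ definition above) =====
theorem make_combination_spec : Claim_equal_make_combination := by
  intro letter n _ hpre
  unfold Spec_make_combination make_combination make_combination_alt
  rcases lt_trichotomy n 0 with hlt | heq | hgt
  · simp [show ¬ n = 0 by omega, show n < 0 by omega, mkA_neg _ n hlt]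
  · exact absurd heq hpre
  · simp only [show ¬ n = 0 by omega, show ¬ n < 0 by omega]
    rw [init_eq_P, loopB_P (n - 1).toNat 1 letter.toList]
    have hP := P_fst letter.toList (n - 1).toNat
    rw [show ((((n - 1).toNat : Nat) : Int) + 1) = n by omega] at hP
    rw [show 1 + (n - 1).toNat = (n - 1).toNat + 1 from Nat.add_comm _ _, ← hP,
      List.map_map]
    rfl
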